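-- pv_equiv track=rewrite | github.com/davidxmoody/advent-of-code | 2023-python/day-07/script.py | score_type
-- ===== SOURCE A (Python) =====
-- from collections import Counter
--
-- def score_type(cards: str, jokers: bool):
--     counter = Counter(cards)
--
--     if jokers:
--         j_count = counter["J"]
--         counter["J"] = 0
--         most_common_card = counter.most_common(1)[0][0]
--         counter[most_common_card] += j_count
--
--     return sum([x * x for x in counter.values()])
-- ===== SOURCE B (Python) =====
-- def score_type(cards: str, jokers: bool):
--     if not jokers:
--         return sum(1 for a in cards for b in cards if a == b)
--     rest = [c for c in cards if c != "J"]
--     j = len(cards) - len(rest)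
--     m = max(map(rest.count, rest), default=0)
--     return sum(1 for a in rest for b in rest if a == b) + j * (2 * m + j)
-- ===== Notes on version B (the rewrite author's own statement) =====
-- stated objective: alternative
-- what changed: B never builds or mutates a counter: it counts equal ordered index pairs directly (sum over positions of each character's multiplicity), and resolves jokers arithmetically by adding j*(2*m + j) where m is the largest non-joker multiplicity, instead of zeroing and re-inserting counter entries around most_common.
import Mathlib
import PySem

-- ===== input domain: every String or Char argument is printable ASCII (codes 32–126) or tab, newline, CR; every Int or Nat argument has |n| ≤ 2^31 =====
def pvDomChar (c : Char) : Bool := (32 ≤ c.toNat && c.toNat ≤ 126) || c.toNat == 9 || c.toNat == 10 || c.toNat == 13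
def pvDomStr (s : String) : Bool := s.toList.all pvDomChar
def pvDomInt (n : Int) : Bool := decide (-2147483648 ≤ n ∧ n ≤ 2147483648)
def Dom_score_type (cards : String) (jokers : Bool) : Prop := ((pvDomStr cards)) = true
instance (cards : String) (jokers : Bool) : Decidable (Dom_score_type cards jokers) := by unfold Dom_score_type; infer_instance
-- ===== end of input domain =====

-- B avoids the counter mutation entirely: it counts equal ordered index pairs and folds the jokers in
-- with the closed-form adjustment j*(2*m + j); same value as A on every input (alternative decomposition).

-- ===== PORT A =====
def score_type (cards : String) (jokers : Bool) : Int :=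
  let counter := PySem.Dict.counter cards.toList
  let counter :=
    if jokers then
      let jCount := counter.getD 'J' 0
      let counter1 := counter.insert 'J' 0
      -- counter.most_common(1)[0][0]: the first key of maximal count; the IndexError branch is
      -- unreachable because the dict always contains the key 'J' at this point
      let mostCommonCard :=
        match PySem.List.max? counter1.items (fun p => p.2) with
        | some p => p.1
        | none => 'J'
      counter1.insert mostCommonCard (counter1.getD mostCommonCard 0 + jCount)
    else counter
  (counter.values.map (fun x => x * x)).sum

-- ===== PORT B =====
-- sum(1 for a in s for b in s if a == b)
def pvPairCount (s : List Char) : Int :=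
  s.foldl (fun acc a => s.foldl (fun acc2 b => if b == a then acc2 + 1 else acc2) acc) 0

def score_type_alt (cards : String) (jokers : Bool) : Int :=
  if !jokers then
    pvPairCount cards.toList
  else
    let rest := cards.toList.filter (fun ch => ch != 'J')
    let j : Int := (cards.toList.length : Int) - (rest.length : Int)
    let m : Int := PySem.List.maxD (rest.map (fun ch => (rest.count ch : Int))) (fun x => x) 0
    pvPairCount rest + j * (2 * m + j)

-- ===== PRECONDITION & SPEC =====
def Spec_score_type (cards : String) (jokers : Bool) (out : Int) : Prop := out = score_type_alt cards jokers
instance (cards : String) (jokers : Bool) (out : Int) : Decidable (Spec_score_type cards jokers out) := by unfold Spec_score_type; infer_instance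

-- ===== CLAIM (what is proved, stated in full; the proofs are below) =====
def Claim_equal_score_type : Prop := ∀ (cards : String) (jokers : Bool), Dom_score_type cards jokers → Spec_score_type cards jokers (score_type cards jokers)

-- ===== LEMMAS AND PROOFS =====

-- the nested pair-counting loop is the sum of the squared multiplicities
theorem pvPairCount_eq (L : List Char) :
    pvPairCount L = ∑ k ∈ L.toFinset, (L.count k : Int) * (L.count k : Int) := by
  unfold pvPairCount
  have h2 := PySem.List.foldl_congr_mem (l := L)
    (fun acc a => L.foldl (fun acc2 b => if b == a then acc2 + 1 else acc2) acc)
    (fun acc a => acc + (L.count a : Int)) 0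
    (fun acc a _ => by
      show L.foldl (fun acc2 b => if b == a then acc2 + 1 else acc2) acc = acc + (L.count a : Int)
      rw [PySem.List.foldl_beq_add_one])
  rw [h2, PySem.List.foldl_add, zero_add, Finset.sum_list_map_count]
  refine Finset.sum_congr rfl (fun m _ => ?_)
  rw [nsmul_eq_mul]

theorem toFinset_ofList (L : List Char) : (PySem.Set.ofList L).toFinset = L.toFinset := by
  apply Finset.ext
  intro x
  simp [List.mem_toFinset, PySem.Set.mem_ofList]

-- sum of squared values of Counter(L) as a Finset sum
theorem counter_sq_sum (L : List Char) :
    (((PySem.Dict.counter L).values.map (fun x => x * x)).sum)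
      = ∑ k ∈ L.toFinset, (L.count k : Int) * (L.count k : Int) := by
  have hv : (PySem.Dict.counter L).values
      = (PySem.Set.ofList L).map (fun k => (L.count k : Int)) := by
    rw [PySem.Dict.values_eq_map_keys _ (PySem.Dict.nodup_keys_counter L) 0,
        PySem.Dict.keys_counter]
    exact List.map_congr_left (fun k _ => by rw [PySem.Dict.getD_counter])
  rw [hv, List.map_map, ← List.sum_toFinset _ (PySem.Set.nodup_ofList L), toFinset_ofList]
  rfl

theorem count_filter_ne (L : List Char) (y : Char) (hy : y ≠ 'J') :
    (L.filter (fun ch => ch != 'J')).count y = L.count y := by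
  induction L with
  | nil => rfl
  | cons a t ih =>
    by_cases ha : a = 'J'
    · subst ha
      simp [ih, Ne.symm hy]
    · simp [List.count_cons, ha, ih]

theorem length_split (L : List Char) :
    L.length = (L.filter (fun ch => ch != 'J')).length + L.count 'J' := by
  induction L with
  | nil => rfl
  | cons a t ih =>
    by_cases ha : a = 'J'
    · subst ha; simp [ih]; omega
    · simp [ha, ih]; omega

theorem nodup_eq_singleton {ks : List Char} {x : Char} (hn : ks.Nodup) (hx : x ∈ ks)
    (hall : ∀ y ∈ ks, y = x) : ks = [x] := by
  cases ks with
  | nil => cases hx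
  | cons a t =>
    have ha : a = x := hall a (List.mem_cons_self ..)
    subst ha
    cases t with
    | nil => rfl
    | cons b u =>
      have hb : b = a := hall b (by simp)
      subst hb
      simp at hn

theorem mem_items_of_mem_keys {d : PySem.Dict Char Int} {x : Char}
    (hx : x ∈ d.keys) : (x, d.getD x 0) ∈ d.items := by
  have hc : d.contains x = true := (PySem.Dict.contains_iff_mem_keys _ _).mpr hx
  have hs : (d.get? x).isSome := by rw [← PySem.Dict.contains_eq_isSome_get?]; exact hc
  obtain ⟨v, hv⟩ := Option.isSome_iff_exists.mp hs
  have hgd : d.getD x 0 = v := by rw [PySem.Dict.getD_eq_get?_getD, hv]; rfl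
  rw [hgd]
  exact PySem.Dict.mem_items_of_get?_eq_some _ hv

-- ===== VERDICT (by name: the statement is the Claim_ definition above) =====
theorem score_type_spec : Claim_equal_score_type := by
  intro cards jokers _
  unfold Spec_score_type
  cases jokers with
  | false =>
    have e1 : score_type cards false
        = ((PySem.Dict.counter cards.toList).values.map (fun x => x * x)).sum := rfl
    have e2 : score_type_alt cards false = pvPairCount cards.toList := rfl
    rw [e1, e2, counter_sq_sum, pvPairCount_eq]
  | true =>
    simp only [score_type, score_type_alt, Bool.not_true, if_pos,
      Bool.false_eq_true, ite_false]
    set L := cards.toList with hL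
    set R := L.filter (fun ch => ch != 'J') with hR
    set d1 := PySem.Dict.counter L with hd1
    set c1 := d1.insert 'J' 0 with hc1
    -- basic facts about c1
    have hnd1 : d1.keys.Nodup := PySem.Dict.nodup_keys_counter L
    have hnd : c1.keys.Nodup := PySem.Dict.nodup_keys_insert _ _ _ hnd1
    have hmemk : ∀ x, x ∈ c1.keys ↔ x = 'J' ∨ x ∈ L := by
      intro x
      rw [hc1, PySem.Dict.mem_keys_insert, hd1, PySem.Dict.keys_counter]
      simp [PySem.Set.mem_ofList]
    have hget : ∀ x, c1.getD x 0 = if x = 'J' then 0 else (L.count x : Int) := by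
      intro x
      rw [hc1, PySem.Dict.getD_insert]
      split
      · rfl
      · rw [hd1, PySem.Dict.getD_counter]
    have hcJ : d1.getD 'J' 0 = (L.count 'J' : Int) := by rw [hd1, PySem.Dict.getD_counter]
    -- the max? call succeeds ('J' is a key)
    have hJk : 'J' ∈ c1.keys := (hmemk 'J').mpr (Or.inl rfl)
    have hne : c1.items ≠ [] := by
      intro h
      have : c1.keys = [] := by
        have : c1.keys = c1.items.map (·.1) := rfl
        rw [this, h]; rfl
      rw [this] at hJk; cases hJk
    obtain ⟨p, hp⟩ : ∃ p, PySem.List.max? c1.items (fun p => p.2) = some p := by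
      cases hmax : PySem.List.max? c1.items (fun p => p.2) with
      | none => exact absurd ((PySem.List.max?_eq_none_iff _ _).mp hmax) hne
      | some p => exact ⟨p, rfl⟩
    rw [hp]
    change ((c1.insert p.1 (c1.getD p.1 0 + d1.getD 'J' 0)).values.map (fun x => x * x)).sum = _
    have hpmem : p ∈ c1.items := PySem.List.max?_mem hp
    have hpmax : ∀ q ∈ c1.items, q.2 ≤ p.2 := PySem.List.max?_isMax hp
    have hpget : c1.getD p.1 0 = p.2 := by
      have := PySem.Dict.get?_of_mem_items (k := p.1) (v := p.2) _ (by simpa using hpmem) hnd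
      exact PySem.Dict.getD_of_get?_eq_some _ 0 this
    have hpkeys : p.1 ∈ c1.keys := PySem.Dict.mem_keys_of_mem_items _ (by simpa using hpmem)
    have hlen : (L.length : Int) - (R.length : Int) = (L.count 'J' : Int) := by
      have := length_split L
      rw [← hR] at this
      omega
    by_cases hr : R = []
    · -- every card is a joker (or the hand is empty): both sides are (count 'J')^2
      have hallJ : ∀ x ∈ L, x = 'J' := by
        intro x hx
        by_contra hne'
        have : x ∈ R := by
          rw [hR, List.mem_filter]
          exact ⟨hx, by simpa using hne'⟩
        rw [hr] at this; cases this
      have htJ : p.1 = 'J' := by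
        rcases (hmemk p.1).mp hpkeys with h | h
        · exact h
        · exact hallJ _ h
      rw [htJ]
      -- the final dict has keys all equal to 'J'
      set d2 := c1.insert 'J' (c1.getD 'J' 0 + d1.getD 'J' 0) with hd2
      have hnd2 : d2.keys.Nodup := PySem.Dict.nodup_keys_insert _ _ _ hnd
      have hkeys2 : ∀ x, x ∈ d2.keys ↔ x = 'J' := by
        intro x
        rw [hd2, PySem.Dict.mem_keys_insert]
        constructor
        · rintro (h | h)
          · exact h
          · rcases (hmemk x).mp h with h' | h'
            · exact h'
            · exact hallJ _ h'
        · intro h; exact Or.inl h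
      have hsing : d2.keys = ['J'] :=
        nodup_eq_singleton hnd2 ((hkeys2 'J').mpr rfl) (fun y hy => (hkeys2 y).mp hy)
      have hgJ : d2.getD 'J' 0 = c1.getD 'J' 0 + d1.getD 'J' 0 := by
        rw [hd2, PySem.Dict.getD_insert_self]
      have hitems : d2.items = [('J', d2.getD 'J' 0)] := by
        rw [PySem.Dict.items_eq_map_keys d2 hnd2 0, hsing]; rfl
      have hvals : d2.values = [d2.getD 'J' 0] := by
        have : d2.values = d2.items.map (·.2) := rfl
        rw [this, hitems]; rfl
      rw [hvals, hgJ, hget 'J', if_pos rfl, hcJ]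
      have hRc : pvPairCount R = 0 := by rw [hr]; rfl
      have hm0 : PySem.List.maxD (R.map (fun ch => (R.count ch : Int))) (fun x => x) 0 = 0 := by
        rw [hr]; rfl
      rw [hRc, hm0, hlen]
      simp only [List.map_cons, List.map_nil, List.sum_cons, List.sum_nil]
      ring
    · -- there is a non-joker card: A's most-common key t is that of maximal multiplicity m
      obtain ⟨x0, hx0⟩ := List.exists_mem_of_ne_nil R hr
      have hx0L : x0 ∈ L ∧ x0 ≠ 'J' := by
        have := List.mem_filter.mp (hR ▸ hx0)
        exact ⟨this.1, by simpa using this.2⟩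
      have hx0c : 1 ≤ L.count x0 := List.count_pos_iff.mpr hx0L.1
      have hx0items : (x0, c1.getD x0 0) ∈ c1.items :=
        mem_items_of_mem_keys ((hmemk x0).mpr (Or.inr hx0L.1))
      have hx0le : (L.count x0 : Int) ≤ p.2 := by
        have := hpmax _ hx0items
        rwa [hget x0, if_neg hx0L.2] at this
      have htne : p.1 ≠ 'J' := by
        intro h
        rw [h, hget 'J', if_pos rfl] at hpget
        omega
      have htL : p.1 ∈ L := by
        rcases (hmemk p.1).mp hpkeys with h | h
        · exact absurd h htne
        · exact h
      have htR : p.1 ∈ R := by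
        rw [hR, List.mem_filter]
        exact ⟨htL, by simpa using htne⟩
      have hp2 : p.2 = (L.count p.1 : Int) := by
        rw [← hpget, hget p.1, if_neg htne]
      -- the maximal multiplicity on the B side equals p.2
      have hm : PySem.List.maxD (R.map (fun ch => (R.count ch : Int))) (fun x => x) 0 = p.2 := by
        have hmapne : R.map (fun ch => (R.count ch : Int)) ≠ [] := by
          simpa using hr
        obtain ⟨m0, hm0⟩ : ∃ m0, PySem.List.max? (R.map (fun ch => (R.count ch : Int))) (fun x => x) = some m0 := by
          cases hq : PySem.List.max? (R.map (fun ch => (R.count ch : Int))) (fun x => x) with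
          | none => exact absurd ((PySem.List.max?_eq_none_iff _ _).mp hq) hmapne
          | some m0 => exact ⟨m0, rfl⟩
        have hmd : PySem.List.maxD (R.map (fun ch => (R.count ch : Int))) (fun x => x) 0 = m0 := by
          unfold PySem.List.maxD
          rw [hm0]; rfl
        obtain ⟨y, hyR, hym⟩ := List.mem_map.mp (PySem.List.max?_mem hm0)
        have hyL : y ∈ L ∧ y ≠ 'J' := by
          have := List.mem_filter.mp (hR ▸ hyR)
          exact ⟨this.1, by simpa using this.2⟩
        have hyitems : (y, c1.getD y 0) ∈ c1.items :=
          mem_items_of_mem_keys ((hmemk y).mpr (Or.inr hyL.1))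
        have hyle : m0 ≤ p.2 := by
          have h1 := hpmax _ hyitems
          rw [hget y, if_neg hyL.2] at h1
          rw [← hym, hR, count_filter_ne L y hyL.2]
          exact_mod_cast h1
        have hgle : p.2 ≤ m0 := by
          have hmem : (R.count p.1 : Int) ∈ R.map (fun ch => (R.count ch : Int)) :=
            List.mem_map.mpr ⟨p.1, htR, rfl⟩
          have := PySem.List.max?_isMax hm0 _ hmem
          rw [hR, count_filter_ne L p.1 htne] at this
          rw [hp2]
          exact_mod_cast this
        rw [hmd]
        omega
      rw [hm]
      -- now compare the two sums over the distinct non-joker cards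
      set d2 := c1.insert p.1 (c1.getD p.1 0 + d1.getD 'J' 0) with hd2
      have hnd2 : d2.keys.Nodup := PySem.Dict.nodup_keys_insert _ _ _ hnd
      have hg : ∀ x, d2.getD x 0 = if x = p.1 then c1.getD p.1 0 + d1.getD 'J' 0 else c1.getD x 0 := by
        intro x
        rw [hd2, PySem.Dict.getD_insert]
      have hA : (d2.values.map (fun x => x * x)).sum
          = ∑ k ∈ d2.keys.toFinset, d2.getD k 0 * d2.getD k 0 := by
        rw [PySem.Dict.values_eq_map_keys d2 hnd2 0, List.map_map,
            ← List.sum_toFinset _ hnd2]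
        rfl
      rw [hA]
      have hmemk2 : ∀ x, x ∈ d2.keys ↔ x = p.1 ∨ x = 'J' ∨ x ∈ L := by
        intro x
        rw [hd2, PySem.Dict.mem_keys_insert]
        constructor
        · rintro (h | h)
          · exact Or.inl h
          · exact Or.inr ((hmemk x).mp h)
        · rintro (h | h)
          · exact Or.inl h
          · exact Or.inr ((hmemk x).mpr h)
      have hJ2 : 'J' ∈ d2.keys.toFinset := List.mem_toFinset.mpr ((hmemk2 'J').mpr (Or.inr (Or.inl rfl)))
      rw [← Finset.sum_erase_add _ _ hJ2]
      have hgJ2 : d2.getD 'J' 0 = 0 := by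
        rw [hg 'J', if_neg (Ne.symm htne), hget 'J', if_pos rfl]
      rw [hgJ2]
      have hK3 : d2.keys.toFinset.erase 'J' = R.toFinset := by
        apply Finset.ext
        intro x
        rw [Finset.mem_erase, List.mem_toFinset, List.mem_toFinset, hmemk2, hR, List.mem_filter]
        constructor
        · rintro ⟨hxne, h | h | h⟩
          · exact ⟨h ▸ htL, by simpa using hxne⟩
          · exact absurd h hxne
          · exact ⟨h, by simpa using hxne⟩
        · rintro ⟨hxL, hxne⟩
          exact ⟨by simpa using hxne, Or.inr (Or.inr hxL)⟩
      rw [hK3]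
      have htRf : p.1 ∈ R.toFinset := List.mem_toFinset.mpr htR
      rw [← Finset.sum_erase_add _ _ htRf, pvPairCount_eq, ← Finset.sum_erase_add _ _ htRf]
      have hcong : ∑ x ∈ R.toFinset.erase p.1, d2.getD x 0 * d2.getD x 0
          = ∑ x ∈ R.toFinset.erase p.1, (R.count x : Int) * (R.count x : Int) := by
        refine Finset.sum_congr rfl (fun x hx => ?_)
        obtain ⟨hxt, hxR⟩ := Finset.mem_erase.mp hx
        have hxRm := List.mem_toFinset.mp hxR
        have hxL : x ∈ L ∧ x ≠ 'J' := by
          have := List.mem_filter.mp (hR ▸ hxRm)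
          exact ⟨this.1, by simpa using this.2⟩
        rw [hg x, if_neg hxt, hget x, if_neg hxL.2, hR, count_filter_ne L x hxL.2]
      rw [hcong]
      have hgt : d2.getD p.1 0 = (L.count p.1 : Int) + (L.count 'J' : Int) := by
        rw [hg p.1, if_pos rfl, hget p.1, if_neg htne, hcJ]
      have hcr : (R.count p.1 : Int) = (L.count p.1 : Int) := by
        rw [hR, count_filter_ne L p.1 htne]
      rw [hgt, hcr, hlen, hp2]
      ring
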